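-- pv_equiv track=rewrite | github.com/leeht0113/codingtest_practice | 프로그래머스/2/42626. 더 맵게/더 맵게.py | solution
-- ===== SOURCE A (Python) =====
-- import heapq
--
-- def solution(scoville, K):
--     answer = 0
--     heapq.heapify(scoville)
--     while scoville:
--         min1 = heapq.heappop(scoville)
--         if min1 >= K:
--             return answer
--         elif len(scoville) == 0:
--             return -1
--         min2 = heapq.heappop(scoville)
--         heapq.heappush(scoville, min1 + (min2*2))
--         answer += 1
--     return answer
-- ===== SOURCE B (Python) =====
-- def solution(scoville, K):
--     answer = 0
--     scoville.sort()
--     i = 0  # start of the live (still unconsumed) part of the sorted list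
--     n = len(scoville)
--     while i < n:
--         min1 = scoville[i]
--         i += 1
--         if min1 >= K:
--             return answer
--         if i == n:
--             return -1
--         min2 = scoville[i]
--         i += 1
--         new = min1 + min2 * 2
--         if scoville[n - 1] <= new:
--             scoville.append(new)      # already >= everything live: keep sorted by appending
--         else:
--             # bisect_left of `new` in the live part scoville[i:]
--             lo, hi = i, n
--             while lo < hi:
--                 mid = (lo + hi) // 2
--                 if scoville[mid] < new:
--                     lo = mid + 1
--                 else:
--                     hi = mid
--             scoville.insert(lo, new)
--         n += 1
--         answer += 1
--     return answer
-- ===== Notes on version B (the rewrite author's own statement) =====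
-- stated objective: alternative
-- what changed: The binary heap is replaced by a list sorted once up front and kept sorted: minima are read off the advancing front of the sorted list and the combined value is re-inserted at its binary-searched position.
import Mathlib
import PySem

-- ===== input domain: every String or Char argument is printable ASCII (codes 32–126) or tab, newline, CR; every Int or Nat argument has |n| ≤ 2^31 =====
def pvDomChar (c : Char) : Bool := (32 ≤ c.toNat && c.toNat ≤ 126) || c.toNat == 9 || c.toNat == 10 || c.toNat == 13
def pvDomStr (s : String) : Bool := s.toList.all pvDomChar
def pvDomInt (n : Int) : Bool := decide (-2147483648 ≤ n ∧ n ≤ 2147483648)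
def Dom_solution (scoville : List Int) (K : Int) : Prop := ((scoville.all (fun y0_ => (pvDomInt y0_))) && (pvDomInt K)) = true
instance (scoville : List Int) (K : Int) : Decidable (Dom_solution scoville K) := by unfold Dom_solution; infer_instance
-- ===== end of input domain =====

-- B replaces A's binary heap by a list kept sorted: sort once, pop the head for the minimum,
-- re-insert the combined value at its ordered position; both Pythons mutate the caller's list
-- in place (with different residual contents/order), so the claim is about return values only.

-- ===== PORT A =====
-- heapq on an Int list is ported by its value semantics: heapify arranges the same elements,
-- heappop returns the minimum value and removes one occurrence of it, heappush adds the value.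
-- Ints are compared by value, so the popped VALUE is exactly Python's (ties are equal values);
-- this is exact for the returned result.
theorem pv_erase_len {h : List Int} {m : Int} (hm : h.min? = some m) :
    (h.erase m).length + 1 = h.length := by
  have hmem : m ∈ h := (List.min?_eq_some_iff.mp hm).1
  have := List.length_erase_of_mem hmem
  have hpos : 0 < h.length := List.length_pos_of_mem hmem
  omega

def solutionLoop (K : Int) (h : List Int) (answer : Int) : Int :=
  match hm : h.min? with
  | none => answer                     -- while condition fails: return answer
  | some min1 =>
    if min1 ≥ K then answer            -- heappop gave min1, h becomes h.erase min1
    else if (h.erase min1).length = 0 then -1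
    else
      match hm2 : (h.erase min1).min? with
      | none => -1                     -- unreachable (the list is nonempty); totality guard only
      | some min2 =>
        solutionLoop K (((h.erase min1).erase min2) ++ [min1 + min2 * 2]) (answer + 1)
termination_by h.length
decreasing_by
  have e1 := pv_erase_len hm
  have e2 := pv_erase_len hm2
  simp only [List.length_append, List.length_cons, List.length_nil]
  omega

def solution (scoville : List Int) (K : Int) : Int :=
  solutionLoop K scoville 0

-- ===== PORT B =====
-- B keeps the sorted list and a start index i of the live part scoville[i:]; the consumed
-- prefix scoville[:i] is never read again, so the port carries the live suffix itself.
-- scoville[n-1] is the last element of the full list (min2 when the live rest is empty),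
-- list.append/list.insert become ++ [v] / List.insertIdx, and the hand-written bisect_left
-- loop (bounds shifted by i) is ported as PySem.List.bisectLeft.
def bpushB (min2 v : Int) (l : List Int) : List Int :=
  if l.getLast?.getD min2 ≤ v then l ++ [v]
  else l.insertIdx (PySem.List.bisectLeft l v) v

theorem length_bpushB (min2 v : Int) (l : List Int) :
    (bpushB min2 v l).length ≤ l.length + 1 := by
  unfold bpushB
  split
  · simp
  · simp only [List.length_insertIdx]
    split <;> omega

def solutionAltLoop (K : Int) (l : List Int) (answer : Int) : Int :=
  match l with
  | [] => answer
  | min1 :: rest =>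
    if min1 ≥ K then answer
    else
      match rest with
      | [] => -1
      | min2 :: rest2 =>
        solutionAltLoop K (bpushB min2 (min1 + min2 * 2) rest2) (answer + 1)
termination_by l.length
decreasing_by
  have := length_bpushB min2 (min1 + min2 * 2) rest2
  simp only [List.length_cons]
  omega

def solution_alt (scoville : List Int) (K : Int) : Int :=
  solutionAltLoop K (PySem.List.sorted scoville (fun x => x) false) 0

-- ===== PRECONDITION & SPEC =====
def Spec_solution (scoville : List Int) (K : Int) (out : Int) : Prop := out = solution_alt scoville K
instance (scoville : List Int) (K : Int) (out : Int) : Decidable (Spec_solution scoville K out) := by unfold Spec_solution; infer_instance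

-- ===== CLAIM (what is proved, stated in full; the proofs are below) =====
def Claim_equal_solution : Prop := ∀ (scoville : List Int) (K : Int), Dom_solution scoville K → Spec_solution scoville K (solution scoville K)

-- ===== LEMMAS AND PROOFS =====
theorem insertIdx_take_drop (x : Int) (l : List Int) (n : Nat) (h : n ≤ l.length) :
    l.insertIdx n x = l.take n ++ x :: l.drop n := by
  induction l generalizing n with
  | nil =>
    cases n with
    | zero => rfl
    | succ m => simp at h
  | cons b t ih =>
    cases n with
    | zero => rfl
    | succ m =>
      rw [List.insertIdx_succ_cons, ih m (by simpa using h)]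
      simp

theorem le_getLast_of_sorted {l : List Int} (hs : l.Pairwise (· ≤ ·)) :
    ∀ a ∈ l, ∀ (h : l ≠ []), a ≤ l.getLast h := by
  induction l with
  | nil => intro a ha; cases ha
  | cons b t ih =>
    intro a ha h
    rcases List.mem_cons.mp ha with rfl | hat
    · match t with
      | [] => simp [List.getLast]
      | c :: t' =>
        rw [List.getLast_cons (by simp)]
        exact (List.pairwise_cons.mp hs).1 _ (List.getLast_mem _)
    · match t with
      | [] => cases hat
      | c :: t' =>
        rw [List.getLast_cons (by simp)]
        exact ih (List.pairwise_cons.mp hs).2 a hat (by simp)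

theorem le_of_mem_sorted_last {l : List Int} (hs : l.Pairwise (· ≤ ·)) {v d : Int}
    (hc : l.getLast?.getD d ≤ v) : ∀ a ∈ l, a ≤ v := by
  intro a ha
  have hne : l ≠ [] := by rintro rfl; cases ha
  rw [List.getLast?_eq_some_getLast hne] at hc
  exact le_trans (le_getLast_of_sorted hs a ha hne) hc

theorem bpush_perm (min2 v : Int) {l : List Int} (hs : l.Pairwise (· ≤ ·)) :
    List.Perm (bpushB min2 v l) (v :: l) := by
  unfold bpushB
  split
  · exact List.perm_append_singleton _ _
  · have hp := (PySem.List.bisectLeft_spec l v hs).1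
    rw [insertIdx_take_drop v l _ hp]
    have h1 := List.perm_middle (a := v) (l₁ := l.take (PySem.List.bisectLeft l v))
      (l₂ := l.drop (PySem.List.bisectLeft l v))
    rwa [List.take_append_drop] at h1

theorem bpush_pairwise (min2 v : Int) {l : List Int} (hs : l.Pairwise (· ≤ ·)) :
    (bpushB min2 v l).Pairwise (· ≤ ·) := by
  unfold bpushB
  split
  · rename_i hc
    refine List.pairwise_append.mpr ⟨hs, by simp, ?_⟩
    intro a ha b hb
    rcases List.mem_singleton.mp hb with rfl
    exact le_of_mem_sorted_last hs hc a ha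
  · obtain ⟨hp, hlt, hge⟩ := PySem.List.bisectLeft_spec l v hs
    rw [insertIdx_take_drop v l _ hp]
    refine List.pairwise_append.mpr ⟨hs.sublist (List.take_sublist _ _), ?_, ?_⟩
    · refine List.pairwise_cons.mpr ⟨?_, hs.sublist (List.drop_sublist _ _)⟩
      intro b hb
      obtain ⟨k, hk, rfl⟩ := List.getElem_of_mem hb
      have hk' : PySem.List.bisectLeft l v + k < l.length := by
        have := List.length_drop (i := PySem.List.bisectLeft l v) (l := l); omega
      rw [List.getElem_drop]
      exact hge _ hk' (by omega)
    · intro a ha b hb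
      obtain ⟨j, hj, rfl⟩ := List.getElem_of_mem ha
      have hjp : j < PySem.List.bisectLeft l v ∧ j < l.length := by
        have ht : (l.take (PySem.List.bisectLeft l v)).length = min (PySem.List.bisectLeft l v) l.length :=
          List.length_take
        omega
      rw [List.getElem_take]
      have hax : l[j] < v := hlt j hjp.2 hjp.1
      rcases List.mem_cons.mp hb with rfl | hb
      · exact le_of_lt hax
      · obtain ⟨k, hk, rfl⟩ := List.getElem_of_mem hb
        have hk' : PySem.List.bisectLeft l v + k < l.length := by
          have := List.length_drop (i := PySem.List.bisectLeft l v) (l := l); omega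
        rw [List.getElem_drop]
        exact le_of_lt (lt_of_lt_of_le hax (hge _ hk' (by omega)))

theorem min?_of_perm_sorted {h : List Int} {m1 : Int} {rest : List Int}
    (hp : List.Perm h (m1 :: rest)) (hs : (m1 :: rest).Pairwise (· ≤ ·)) :
    h.min? = some m1 := by
  refine List.min?_eq_some_iff.mpr ⟨hp.mem_iff.mpr List.mem_cons_self, ?_⟩
  intro b hb
  rcases List.mem_cons.mp (hp.mem_iff.mp hb) with h' | h'
  · omega
  · exact (List.pairwise_cons.mp hs).1 b h'

theorem loop_eq (K : Int) (n : Nat) : ∀ (h l : List Int) (ans : Int), h.length = n →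
    List.Perm h l → l.Pairwise (· ≤ ·) → solutionLoop K h ans = solutionAltLoop K l ans := by
  induction n using Nat.strong_induction_on with
  | _ n ih =>
    intro h l ans hn hp hs
    match l with
    | [] =>
      have : h = [] := hp.eq_nil
      subst this
      simp [solutionLoop, solutionAltLoop]
    | m1 :: rest =>
      have hmin : h.min? = some m1 := min?_of_perm_sorted hp hs
      have hp1 : List.Perm (h.erase m1) rest := by
        have := hp.erase m1
        simpa using this
      rw [solutionLoop, solutionAltLoop.eq_def]
      split
      · rename_i heq
        rw [hmin] at heq
        exact absurd heq (by simp)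
      · rename_i min1' heq
        rw [hmin] at heq
        injection heq with heq
        subst heq
        by_cases hk : m1 ≥ K
        · simp [hk]
        · simp only [hk, if_false]
          match rest with
          | [] =>
            have h1nil : h.erase m1 = [] := hp1.eq_nil
            simp [h1nil]
          | m2 :: rest2 =>
            have hrs : (m2 :: rest2).Pairwise (· ≤ ·) := (List.pairwise_cons.mp hs).2
            have hmin2 : (h.erase m1).min? = some m2 := min?_of_perm_sorted hp1 hrs
            have hne : ¬ (h.erase m1).length = 0 := by
              rw [hp1.length_eq]; simp
            simp only [hne, if_false]
            split
            · rename_i heq2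
              rw [hmin2] at heq2
              exact absurd heq2 (by simp)
            · rename_i min2' heq2
              rw [hmin2] at heq2
              injection heq2 with heq2
              subst heq2
              have hlen : (h.erase m1).length + 1 = h.length := pv_erase_len hmin
              have hlen2 : ((h.erase m1).erase m2).length + 1 = (h.erase m1).length :=
                pv_erase_len hmin2
              apply ih (n - 1) (by omega)
              · simp only [List.length_append, List.length_cons, List.length_nil]; omega
              · have hp2 : List.Perm ((h.erase m1).erase m2) rest2 := by
                  have := hp1.erase m2
                  simpa using this
                exact ((List.perm_append_singleton _ _).trans (hp2.cons _)).trans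
                  (bpush_perm _ _ (List.pairwise_cons.mp hrs).2).symm
              · exact bpush_pairwise _ _ (List.pairwise_cons.mp hrs).2

-- ===== VERDICT (by name: the statement is the Claim_ definition above) =====
theorem solution_spec : Claim_equal_solution := by
  intro scoville K _
  unfold Spec_solution solution solution_alt
  exact loop_eq K scoville.length scoville _ 0 rfl
    (PySem.List.sorted_perm scoville (fun x => x) false).symm
    (PySem.List.sorted_pairwise scoville (fun x => x))
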